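-- pv_equiv track=rewrite | github.com/psethzp/PAR-ARK | par_ark_deadline_rescue_2026_05_06/scripts/21_pair_diagnostics.py | ranked_answers
-- ===== SOURCE A (Python) =====
-- from collections import Counter, defaultdict
-- from typing import Any
--
-- def ranked_answers(d: dict[str, Any], max_agents: int = 1) -> list[int]:
--     flat: list[int] = []
--     for tr in d.get("trajectories", [])[:max_agents]:
--         flat.extend(int(x) for x in tr.get("agent_answer_indices", []) if str(x).lstrip("-").isdigit())
--     counts = Counter(flat)
--     first_seen: dict[int, int] = {}
--     for i, idx in enumerate(flat):
--         first_seen.setdefault(idx, i)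
--     return sorted(counts.keys(), key=lambda x: (-counts[x], first_seen[x]))
-- ===== SOURCE B (Python) =====
-- def ranked_answers(d, max_agents=1):
--     flat = [int(x)
--             for tr in d.get("trajectories", [])[:max_agents]
--             for x in tr.get("agent_answer_indices", [])
--             if str(x).lstrip("-").isdigit()]
--     counts = {}
--     for x in flat:
--         counts[x] = counts.get(x, 0) + 1
--     # counting-sort style: no comparison sort; emit buckets from the highest
--     # count down, keys inside a bucket in first-seen (insertion) order
--     out = []
--     for c in range(max(counts.values(), default=0), 0, -1):
--         out.extend(x for x in counts if counts[x] == c)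
--     return out
-- ===== Notes on version B (the rewrite author's own statement) =====
-- stated objective: alternative
-- what changed: B replaces A's comparison sort with a composite (-count, first_seen) key by a counting-sort style bucket pass: it counts into one dict built in first-seen order and then emits keys bucket by bucket from the maximum count down, insertion order supplying the first-seen tie-break, so no sort and no first_seen map exist at all.
import Mathlib
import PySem

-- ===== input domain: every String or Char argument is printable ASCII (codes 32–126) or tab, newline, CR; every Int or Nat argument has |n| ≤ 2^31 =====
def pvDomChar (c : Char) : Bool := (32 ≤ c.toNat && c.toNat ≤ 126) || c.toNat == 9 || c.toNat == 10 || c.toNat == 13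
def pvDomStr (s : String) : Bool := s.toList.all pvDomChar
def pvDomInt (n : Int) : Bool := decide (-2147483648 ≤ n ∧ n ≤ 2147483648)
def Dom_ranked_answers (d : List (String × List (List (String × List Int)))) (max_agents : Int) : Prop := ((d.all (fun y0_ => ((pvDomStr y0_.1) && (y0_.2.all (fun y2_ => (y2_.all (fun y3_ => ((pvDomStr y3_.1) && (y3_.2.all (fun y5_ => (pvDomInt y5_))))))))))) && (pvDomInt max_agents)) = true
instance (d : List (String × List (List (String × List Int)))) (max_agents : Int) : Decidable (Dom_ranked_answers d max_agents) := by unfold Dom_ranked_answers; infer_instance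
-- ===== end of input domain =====

-- B replaces A's comparison sort with the composite (-count, first_seen) key by a counting-sort
-- style bucket pass over a single counting dict built in first-seen order (objective: alternative).

-- ===== PORT A =====
-- the filter `str(x).lstrip("-").isdigit()`; `int(x)` on an int x is the identity, so the extend adds x itself
def pvIsIntLike (x : Int) : Bool :=
  PySem.Chars.strIsdigit ((PySem.Int.toChars x).dropWhile (fun c => c == '-'))

-- counts[x] / first_seen[x] are ported as getD _ 0: every key sorted is a key of both dicts
def ranked_answers (d : List (String × List (List (String × List Int)))) (max_agents : Int) : List Int :=
  let flat : List Int :=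
    (PySem.List.slice ((PySem.Dict.mk d).getD "trajectories" []) none (some max_agents)).foldl
      (fun flat tr =>
        flat ++ ((PySem.Dict.mk tr).getD "agent_answer_indices" []).filter pvIsIntLike)
      []
  let counts := PySem.Dict.counter flat
  let first_seen : PySem.Dict Int Int :=
    (flat.zipIdx).foldl (fun fs p => fs.setdefault p.1 (p.2 : Int)) PySem.Dict.empty
  PySem.List.sorted2 counts.keys
    (fun x => -(counts.getD x 0)) (fun x => first_seen.getD x 0) false

-- ===== PORT B =====
def ranked_answers_alt (d : List (String × List (List (String × List Int)))) (max_agents : Int) : List Int :=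
  let flat : List Int :=
    (PySem.List.slice ((PySem.Dict.mk d).getD "trajectories" []) none (some max_agents)).flatMap
      (fun tr => ((PySem.Dict.mk tr).getD "agent_answer_indices" []).filter pvIsIntLike)
  let counts : PySem.Dict Int Int :=
    flat.foldl (fun c x => c.insert x (c.getD x 0 + 1)) PySem.Dict.empty
  -- max(counts.values(), default=0)
  let m : Int := match PySem.List.max? counts.values (fun v => v) with
    | some v => v
    | none => 0
  (PySem.List.pyRange m 0 (-1)).foldl
    (fun out c => out ++ counts.keys.filter (fun x => counts.getD x 0 == c)) []

-- ===== PRECONDITION & SPEC =====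
def Spec_ranked_answers (d : List (String × List (List (String × List Int)))) (max_agents : Int) (out : List Int) : Prop := out = ranked_answers_alt d max_agents
instance (d : List (String × List (List (String × List Int)))) (max_agents : Int) (out : List Int) : Decidable (Spec_ranked_answers d max_agents out) := by unfold Spec_ranked_answers; infer_instance

-- ===== CLAIM (what is proved, stated in full; the proofs are below) =====
def Claim_equal_ranked_answers : Prop := ∀ (d : List (String × List (List (String × List Int)))) (max_agents : Int), Dom_ranked_answers d max_agents → Spec_ranked_answers d max_agents (ranked_answers d max_agents)

-- ===== LEMMAS AND PROOFS =====

theorem pv_before_lex (p q r s : Int) :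
    (decide (p < r) || (!decide (r < p) && decide (q < s)))
      = decide (toLex (p, q) < toLex (r, s)) := by
  rcases lt_trichotomy p r with h | h | h <;>
    simp [Prod.Lex.lt_iff, h, not_lt_of_gt]

-- a two-key sort is a one-key sort by the lexicographic key
theorem pv_sorted2_eq_sorted_lex {α : Type} (xs : List α) (k1 k2 : α → Int) :
    PySem.List.sorted2 xs k1 k2 false
      = PySem.List.sorted xs (fun x => toLex (k1 x, k2 x)) false := by
  simp only [PySem.List.sorted2, PySem.List.sorted, if_neg Bool.false_ne_true]
  congr 1
  funext acc x
  congr 1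
  funext a b
  exact pv_before_lex (k1 a) (k2 a) (k1 b) (k2 b)

-- the first_seen values are strictly increasing along the first-occurrence (= set/dict key) order
theorem pv_fs_keys_pairwise :
    ∀ (l : List Int) (n : Nat) (s : List Int) (dd : PySem.Dict Int Int),
    (∀ x : Int, dd.contains x = true ↔ x ∈ s) →
    s.Pairwise (fun a b => dd.getD a 0 < dd.getD b 0) →
    (∀ x ∈ s, dd.getD x 0 < (n : Int)) →
    (l.foldl PySem.Set.add s).Pairwise (fun a b =>
      ((l.zipIdx n).foldl (fun fs p => fs.setdefault p.1 (p.2 : Int)) dd).getD a 0 <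
      ((l.zipIdx n).foldl (fun fs p => fs.setdefault p.1 (p.2 : Int)) dd).getD b 0) := by
  intro l
  induction l with
  | nil => intro n s dd _ hp _; simpa using hp
  | cons y t ih =>
    intro n s dd hc hp hb
    simp only [List.zipIdx_cons, List.foldl_cons, PySem.Set.add]
    by_cases hy : y ∈ s
    · have hcy : dd.contains y = true := (hc y).mpr hy
      rw [if_pos ((PySem.Set.contains_iff s y).mpr hy),
          PySem.Dict.setdefault_of_contains dd ((y, n).2 : Int) hcy]
      exact ih (n + 1) s dd hc hp (fun x hx => lt_trans (hb x hx) (by push_cast; omega))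
    · have hcy : dd.contains y = false := by
        rcases Bool.eq_false_or_eq_true (dd.contains y) with h | h
        · exact absurd ((hc y).mp h) hy
        · exact h
      rw [if_neg (by simp [hy]),
          PySem.Dict.setdefault_of_not_contains dd _ hcy]
      have hne : ∀ x ∈ s, x ≠ y := fun x hx h => hy (h ▸ hx)
      refine ih (n + 1) (s ++ [y]) (dd.insert y (n : Int)) ?_ ?_ ?_
      · intro x
        rw [PySem.Dict.contains_insert]
        simp [hc x, or_comm]
      · rw [List.pairwise_append]
        refine ⟨hp.imp_of_mem ?_, by simp, ?_⟩
        · intro a b ha hb' h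
          rw [PySem.Dict.getD_insert, PySem.Dict.getD_insert,
              if_neg (hne a ha), if_neg (hne b hb')]
          exact h
        · intro a ha b hb'
          simp only [List.mem_singleton] at hb'
          subst hb'
          rw [PySem.Dict.getD_insert, PySem.Dict.getD_insert, if_neg (hne a ha), if_pos rfl]
          exact hb a ha
      · intro x hx
        rcases List.mem_append.mp hx with hx | hx
        · rw [PySem.Dict.getD_insert, if_neg (hne x hx)]
          exact lt_trans (hb x hx) (by push_cast; omega)
        · simp only [List.mem_singleton] at hx
          subst hx
          rw [PySem.Dict.getD_insert, if_pos rfl]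
          push_cast; omega

-- splitting a filter over a disjunction of disjoint predicates, up to permutation
theorem pv_filter_or_perm {α : Type} (p q : α → Bool) :
    ∀ (l : List α), (∀ x ∈ l, ¬(p x = true ∧ q x = true)) →
    (l.filter (fun x => p x || q x)).Perm (l.filter p ++ l.filter q) := by
  intro l
  induction l with
  | nil => intro _; simp
  | cons x t ih =>
    intro hd
    have iht := ih (fun y hy => hd y (List.mem_cons_of_mem _ hy))
    by_cases hp : p x = true
    · have hq : q x = false := by
        rcases Bool.eq_false_or_eq_true (q x) with h | h
        · exact absurd ⟨hp, h⟩ (hd x List.mem_cons_self)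
        · exact h
      simpa [List.filter_cons, hp, hq] using iht.cons x
    · by_cases hq : q x = true
      · simp only [List.filter_cons, hp, hq, Bool.false_or,
          Bool.false_eq_true, if_false]
        exact (iht.cons x).trans List.perm_middle.symm
      · simp only [List.filter_cons, hp, hq, Bool.false_or, Bool.false_eq_true, if_false]
        exact iht

-- a bucket decomposition over a nodup list of bucket values is a permutation of the filtered list
theorem pv_flatMap_filter_perm {α : Type} (g : α → Int) :
    ∀ (cs : List Int) (l : List α), cs.Nodup →
    (cs.flatMap (fun c => l.filter (fun x => g x == c))).Perm
      (l.filter (fun x => cs.contains (g x))) := by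
  intro cs
  induction cs with
  | nil => intro l _; simp
  | cons c cs' ih =>
    intro l hnd
    rw [List.nodup_cons] at hnd
    simp only [List.flatMap_cons]
    have h1 : (l.filter (fun x => (c :: cs').contains (g x))).Perm
        (l.filter (fun x => g x == c) ++ l.filter (fun x => cs'.contains (g x))) := by
      have := pv_filter_or_perm (fun x => g x == c) (fun x => cs'.contains (g x)) l
        (fun x _ h => hnd.1 (by
          have h1 := of_decide_eq_true (by simpa using h.1)
          have h2 : g x ∈ cs' := by simpa using h.2
          exact h1 ▸ h2))
      simpa [List.contains_cons] using this
    exact (List.Perm.append_left _ (ih l hnd.2)).trans h1.symm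

-- pairwise lexicographic order of the bucket concatenation: buckets strictly decreasing in c,
-- elements of bucket c have g = c, and within a bucket fs is strictly increasing
theorem pv_flatMap_pairwise {α : Type} (g fs : α → Int) (l : List α)
    (hR : l.Pairwise (fun a b => fs a < fs b)) :
    ∀ (cs : List Int), cs.Pairwise (fun a b => b < a) →
    (cs.flatMap (fun c => l.filter (fun x => g x == c))).Pairwise
      (fun a b => toLex (-g a, fs a) < toLex (-g b, fs b)) := by
  intro cs
  induction cs with
  | nil => intro _; simp
  | cons c cs' ih =>
    intro hp
    rw [List.pairwise_cons] at hp
    simp only [List.flatMap_cons]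
    rw [List.pairwise_append]
    refine ⟨?_, ih hp.2, ?_⟩
    · have := hR.filter (fun x => g x == c)
      refine this.imp_of_mem ?_
      intro a b ha hb h
      have hga : g a = c := by simpa using (List.mem_filter.mp ha).2
      have hgb : g b = c := by simpa using (List.mem_filter.mp hb).2
      rw [hga, hgb]
      exact Prod.Lex.lt_iff.mpr (Or.inr ⟨rfl, h⟩)
    · intro a ha b hb
      have hga : g a = c := by simpa using (List.mem_filter.mp ha).2
      rcases List.mem_flatMap.mp hb with ⟨c', hc', hb'⟩
      have hgb : g b = c' := by simpa using (List.mem_filter.mp hb').2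
      have hlt : c' < c := hp.1 c' hc'
      rw [hga, hgb]
      exact Prod.Lex.lt_iff.mpr (Or.inl (show (-c : Int) < -c' by omega))

-- every key of the counter has multiplicity between 1 and the maximum of the values
theorem pv_count_bounds (flat : List Int) (k : Int)
    (hk : k ∈ (PySem.Dict.counter flat).keys) :
    1 ≤ (PySem.Dict.counter flat).getD k 0 ∧
    (PySem.Dict.counter flat).getD k 0 ≤
      (match PySem.List.max? (PySem.Dict.counter flat).values (fun v => v) with
        | some v => v | none => 0) := by
  constructor
  · rw [PySem.Dict.getD_counter]
    have hkf : k ∈ flat := by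
      rw [PySem.Dict.keys_counter] at hk
      exact (PySem.Set.mem_ofList flat k).mp hk
    have := List.count_pos_iff.mpr hkf
    omega
  · have hv : (PySem.Dict.counter flat).getD k 0 ∈ (PySem.Dict.counter flat).values := by
      rw [PySem.Dict.values_eq_map_keys _ (PySem.Dict.nodup_keys_counter flat) 0]
      exact List.mem_map.mpr ⟨k, hk, rfl⟩
    cases hmx : PySem.List.max? (PySem.Dict.counter flat).values (fun v => v) with
    | none =>
      rw [PySem.List.max?_eq_none_iff] at hmx
      rw [hmx] at hv
      simp at hv
    | some v =>
      simpa using PySem.List.max?_isMax hmx _ hv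

-- the heart of the claim: sorting the counter's keys by (-count, first_seen) equals emitting the
-- count-buckets from the maximum count down, each bucket in key (= first-seen) order
theorem pv_main (flat : List Int) :
    PySem.List.sorted2 (PySem.Dict.counter flat).keys
      (fun x => -((PySem.Dict.counter flat).getD x 0))
      (fun x => ((flat.zipIdx).foldl (fun fs p => fs.setdefault p.1 (p.2 : Int)) PySem.Dict.empty).getD x 0) false
    = (PySem.List.pyRange
        (match PySem.List.max? (PySem.Dict.counter flat).values (fun v => v) with
          | some v => v | none => 0) 0 (-1)).flatMap
        (fun c => (PySem.Dict.counter flat).keys.filter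
          (fun x => (PySem.Dict.counter flat).getD x 0 == c)) := by
  set counts := PySem.Dict.counter flat with hcounts
  set m : Int := (match PySem.List.max? counts.values (fun v => v) with
      | some v => v | none => 0) with hm
  set g : Int → Int := fun x => counts.getD x 0 with hg
  set fs : Int → Int := fun x =>
    ((flat.zipIdx).foldl (fun p_ q_ => p_.setdefault q_.1 (q_.2 : Int)) PySem.Dict.empty).getD x 0 with hfs
  rw [pv_sorted2_eq_sorted_lex]
  have hRkeys : counts.keys.Pairwise (fun a b => fs a < fs b) := by
    rw [hcounts, PySem.Dict.keys_counter, PySem.Set.ofList_eq_foldl]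
    exact pv_fs_keys_pairwise flat 0 [] PySem.Dict.empty
      (by simp [PySem.Dict.contains_empty]) (by simp) (by simp)
  have hcs_nd : (PySem.List.pyRange m 0 (-1)).Nodup := by
    rw [PySem.List.pyRange_neg_one_eq_reverse, List.nodup_reverse]
    exact PySem.List.nodup_pyRange_one _ _
  have hcs_pw : (PySem.List.pyRange m 0 (-1)).Pairwise (fun a b => b < a) := by
    rw [PySem.List.pyRange_neg_one_eq_reverse, List.pairwise_reverse]
    exact PySem.List.pairwise_lt_pyRange_one _ _
  apply PySem.List.sorted_eq_of_perm_of_pairwise_lt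
  · refine (pv_flatMap_filter_perm g _ counts.keys hcs_nd).trans ?_
    have hall : ∀ k ∈ counts.keys, ((PySem.List.pyRange m 0 (-1)).contains (g k)) = true := by
      intro k hk
      rcases pv_count_bounds flat k hk with ⟨h1, h2⟩
      have hgk : g k = (PySem.Dict.counter flat).getD k 0 := rfl
      have : g k ∈ PySem.List.pyRange m 0 (-1) := by
        rw [PySem.List.mem_pyRange_neg_one]
        exact ⟨by rw [hgk]; omega, by rw [hgk]; exact h2⟩
      simpa [List.contains_iff_mem] using this
    rw [List.filter_eq_self.mpr hall]
  · exact pv_flatMap_pairwise g fs counts.keys hRkeys _ hcs_pw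

-- ===== VERDICT (by name: the statement is the Claim_ definition above) =====
theorem ranked_answers_spec : Claim_equal_ranked_answers := by
  intro d max_agents _
  unfold Spec_ranked_answers ranked_answers ranked_answers_alt
  simp only [PySem.List.foldl_append_eq_flatMap, List.nil_append,
    PySem.Dict.foldl_insert_getD_add_one_eq_counter]
  exact pv_main _
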